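-- pv_equiv track=rewrite | github.com/iamserda/SWENG24 | py_core/sum_of_multiples/solutions.py | sum_of_multiples_of
-- ===== SOURCE A (Python) =====
-- def sum_of_multiples_of(x, num):
--     """Given an integer, and sum number x, return the sums of digits that are multiples of x."""
--     result = 0
--     if not x:
--         return None
--
--     while num > 0:
--         n = num % 10
--         if n % x == 0:
--             result += n
--         num //= 10
--     return result
-- ===== SOURCE B (Python) =====
-- def sum_of_multiples_of(x, num):
--     """Given an integer, and sum number x, return the sums of digits that are multiples of x."""
--     if not x:
--         return None
--     if num <= 0:
--         return 0
--     return sum(d for d in (ord(c) - 48 for c in str(num)) if d % x == 0)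
-- ===== Notes on version B (the rewrite author's own statement) =====
-- stated objective: idiomatic
-- what changed: Replaces the %10///10 arithmetic digit-extraction loop with a single sum comprehension over the decimal string form str(num), filtering digits divisible by x.
import Mathlib
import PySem

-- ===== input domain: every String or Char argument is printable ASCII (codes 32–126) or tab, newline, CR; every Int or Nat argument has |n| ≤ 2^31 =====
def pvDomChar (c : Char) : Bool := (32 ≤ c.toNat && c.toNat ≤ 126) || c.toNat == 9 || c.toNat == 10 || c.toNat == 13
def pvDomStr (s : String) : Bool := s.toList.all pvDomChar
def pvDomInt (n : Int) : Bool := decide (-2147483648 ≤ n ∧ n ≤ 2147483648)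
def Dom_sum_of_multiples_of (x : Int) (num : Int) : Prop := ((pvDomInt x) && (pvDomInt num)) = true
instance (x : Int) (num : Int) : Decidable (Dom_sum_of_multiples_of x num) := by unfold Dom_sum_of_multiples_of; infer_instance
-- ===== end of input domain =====

-- B replaces A's %10 // 10 digit-extraction loop with a sum comprehension over the
-- characters of str(num) (idiomatic; same cost).

-- ===== PORT A =====
-- the while loop of A: state (num, result)
def pyWhileA (x : Int) (num : Int) (result : Int) : Int :=
  if 0 < num then
    let n := PySem.Int.mod num 10
    pyWhileA x (PySem.Int.floordiv num 10)
      (if PySem.Int.mod n x == 0 then result + n else result)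
  else result
termination_by num.toNat
decreasing_by
  have h : PySem.Int.floordiv num 10 = num / 10 := by
    simp [PySem.Int.floordiv, Int.fdiv_eq_ediv]
  rw [h]; omega

def sum_of_multiples_of (x : Int) (num : Int) : Option Int :=
  if x == 0 then none
  else some (pyWhileA x num 0)

-- ===== PORT B =====
-- sum(d for d in (ord(c) - 48 for c in str(num)) if d % x == 0);
-- ord(c) - 48 is exact here: str of a positive int yields only '0'..'9'
def sum_of_multiples_of_alt (x : Int) (num : Int) : Option Int :=
  if x == 0 then none
  else if num ≤ 0 then some 0
  else some ((((PySem.Int.toChars num).map (fun c => (c.toNat : Int) - 48)).filter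
      (fun d => PySem.Int.mod d x == 0)).sum)

-- ===== PRECONDITION & SPEC =====
def Spec_sum_of_multiples_of (x : Int) (num : Int) (out : Option Int) : Prop := out = sum_of_multiples_of_alt x num
instance (x : Int) (num : Int) (out : Option Int) : Decidable (Spec_sum_of_multiples_of x num out) := by unfold Spec_sum_of_multiples_of; infer_instance

-- ===== CLAIM (what is proved, stated in full; the proofs are below) =====
def Claim_equal_sum_of_multiples_of : Prop := ∀ (x : Int) (num : Int), Dom_sum_of_multiples_of x num → Spec_sum_of_multiples_of x num (sum_of_multiples_of x num)

-- ===== LEMMAS AND PROOFS =====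

theorem digitChar_toNat {d : Nat} (h : d < 10) : (Nat.digitChar d).toNat = 48 + d := by
  interval_cases d <;> rfl

theorem toDigitsCore_eq (n : Nat) : ∀ (fuel : Nat) (ds : List Char), n < fuel →
    Nat.toDigitsCore 10 fuel n ds = Nat.toDigits 10 n ++ ds := by
  induction n using Nat.strong_induction_on with
  | _ n IH =>
    intro fuel ds h
    match fuel, h with
    | f + 1, h =>
      rw [Nat.toDigitsCore]
      by_cases h0 : n / 10 = 0
      · simp only [h0, Nat.toDigits, Nat.toDigitsCore]
        rfl
      · have hn10 : 10 ≤ n := by omega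
        have hlt : n / 10 < n := Nat.div_lt_self (by omega) (by omega)
        rw [if_neg h0, IH _ hlt _ _ (by omega)]
        have : Nat.toDigits 10 n = Nat.toDigits 10 (n / 10) ++ [Nat.digitChar (n % 10)] := by
          rw [Nat.toDigits, Nat.toDigitsCore, if_neg h0, IH _ hlt _ _ (by omega)]
        rw [this]; simp

theorem toDigits_step {n : Nat} (h : 10 ≤ n) :
    Nat.toDigits 10 n = Nat.toDigits 10 (n / 10) ++ [Nat.digitChar (n % 10)] := by
  have h0 : ¬ n / 10 = 0 := by omega
  have hlt : n / 10 < n := Nat.div_lt_self (by omega) (by omega)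
  rw [Nat.toDigits, Nat.toDigitsCore, if_neg h0, toDigitsCore_eq _ _ _ (by omega)]

theorem toDigits_small {n : Nat} (h : n < 10) :
    Nat.toDigits 10 n = [Nat.digitChar n] := by
  have h0 : n / 10 = 0 := by omega
  rw [Nat.toDigits, Nat.toDigitsCore, if_pos h0, Nat.mod_eq_of_lt h]

def digitSum (x : Int) (l : List Char) : Int :=
  ((l.map (fun c => (c.toNat : Int) - 48)).filter (fun d => PySem.Int.mod d x == 0)).sum

theorem fmod_cast (m : Nat) : PySem.Int.mod (m : Int) 10 = ((m % 10 : Nat) : Int) := by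
  simp only [PySem.Int.mod, Int.fmod_eq_emod]
  omega

theorem fdiv_cast (m : Nat) : PySem.Int.floordiv (m : Int) 10 = ((m / 10 : Nat) : Int) := by
  simp only [PySem.Int.floordiv, Int.fdiv_eq_ediv]
  omega

theorem digitSum_append (x : Int) (l1 l2 : List Char) :
    digitSum x (l1 ++ l2) = digitSum x l1 + digitSum x l2 := by
  simp [digitSum]

theorem digitSum_single (x : Int) {d : Nat} (h : d < 10) :
    digitSum x [Nat.digitChar d] =
      if PySem.Int.mod (d : Int) x == 0 then (d : Int) else 0 := by
  have hc : ((Nat.digitChar d).toNat : Int) - 48 = (d : Int) := by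
    rw [digitChar_toNat h]; push_cast; ring
  simp only [digitSum, List.map, List.filter, hc]
  by_cases h1 : PySem.Int.mod (d : Int) x == 0 <;> simp [h1]

theorem pyWhileA_digits (x : Int) (m : Nat) (hm : 0 < m) :
    ∀ r : Int, pyWhileA x (m : Int) r = r + digitSum x (Nat.toDigits 10 m) := by
  induction m using Nat.strong_induction_on with
  | _ m IH =>
    intro r
    rw [pyWhileA, if_pos (by exact_mod_cast hm)]
    simp only [fmod_cast, fdiv_cast]
    by_cases hs : m < 10
    · have h0 : m / 10 = 0 := by omega
      rw [h0, toDigits_small hs]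
      have hm10 : m % 10 = m := Nat.mod_eq_of_lt hs
      rw [hm10, digitSum_single x hs]
      rw [pyWhileA]
      norm_num
      split_ifs <;> ring
    · have hlt : m / 10 < m := Nat.div_lt_self (by omega) (by omega)
      rw [toDigits_step (by omega), digitSum_append,
        digitSum_single x (Nat.mod_lt _ (by omega)),
        IH _ hlt (by omega)]
      split_ifs <;> ring

-- ===== VERDICT (by name: the statement is the Claim_ definition above) =====
theorem sum_of_multiples_of_spec : Claim_equal_sum_of_multiples_of := by
  intro x num _
  unfold Spec_sum_of_multiples_of sum_of_multiples_of sum_of_multiples_of_alt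
  by_cases hx : x == 0
  · simp [hx]
  · rw [if_neg hx, if_neg hx]
    by_cases hn : num ≤ 0
    · rw [if_pos hn, pyWhileA, if_neg (by omega)]
    · rw [if_neg hn]
      have hpos : 0 < num := by omega
      have hcast : num = ((num.toNat : Nat) : Int) := by omega
      rw [hcast, pyWhileA_digits x num.toNat (by omega) 0]
      simp only [PySem.Int.toChars, if_neg (by omega : ¬ ((num.toNat : Nat) : Int) < 0),
        Int.toNat_natCast]
      simp [digitSum]
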